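-- pv_equiv track=rewrite | github.com/omegaestable/magma-ai | build_graph_cheatsheet_v2.py | find_equiv_classes
-- ===== SOURCE A (Python) =====
-- from collections import defaultdict
--
-- def find_equiv_classes(true_edges, n):
--     """Union-find based equivalence classes."""
--     parent = list(range(n + 1))
--     rank = [0] * (n + 1)
--
--     def find(x):
--         while parent[x] != x:
--             parent[x] = parent[parent[x]]
--             x = parent[x]
--         return x
--
--     def union(a, b):
--         a, b = find(a), find(b)
--         if a == b:
--             return
--         if rank[a] < rank[b]:
--             a, b = b, a
--         parent[b] = a
--         if rank[a] == rank[b]: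
--             rank[a] += 1
--
--     for (i, j) in true_edges:
--         if i != j and (j, i) in true_edges:
--             union(i, j)
--
--     classes = defaultdict(set)
--     for i in range(1, n + 1):
--         classes[find(i)].add(i)
--
--     # Use minimum member as representative
--     result = {}
--     for members in classes.values():
--         rep = min(members)
--         result[rep] = sorted(members)
--
--     return result
-- ===== SOURCE B (Python) =====
-- def find_equiv_classes(true_edges, n):
--     """Quick-find: one label per node, classes merged by wholesale relabeling."""
--     edge_set = set(true_edges)
--     label = list(range(n + 1))
--     for (i, j) in true_edges:
--         if i != j and (j, i) in edge_set:
--             la, lb = label[i], label[j]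
--             if la != lb:
--                 label = [la if v == lb else v for v in label]
--     groups = {}
--     for v in range(1, n + 1):
--         groups.setdefault(label[v], []).append(v)
--     return {g[0]: g for g in groups.values()}
-- ===== Notes on version B (the rewrite author's own statement) =====
-- stated objective: faster
-- what changed: Replaces the union-find forest (parent/rank arrays, find loop with path halving, union by rank, then a per-class min/sort pass) by a quick-find label array: each mutual edge merges two components by one wholesale relabeling pass, and nodes 1..n are then grouped by label in one ascending pass that is already sorted with the minimum first, removing the membership scan 'in true_edges' (a set is built once), the per-node find loops and the per-class min/sort.
-- outside the precondition, e.g. on find_equiv_classes([(-1, 1), (1, -1)], 2): A returns {1: [1, 2]}, B returns {1: [1, 2]}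
import Mathlib
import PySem

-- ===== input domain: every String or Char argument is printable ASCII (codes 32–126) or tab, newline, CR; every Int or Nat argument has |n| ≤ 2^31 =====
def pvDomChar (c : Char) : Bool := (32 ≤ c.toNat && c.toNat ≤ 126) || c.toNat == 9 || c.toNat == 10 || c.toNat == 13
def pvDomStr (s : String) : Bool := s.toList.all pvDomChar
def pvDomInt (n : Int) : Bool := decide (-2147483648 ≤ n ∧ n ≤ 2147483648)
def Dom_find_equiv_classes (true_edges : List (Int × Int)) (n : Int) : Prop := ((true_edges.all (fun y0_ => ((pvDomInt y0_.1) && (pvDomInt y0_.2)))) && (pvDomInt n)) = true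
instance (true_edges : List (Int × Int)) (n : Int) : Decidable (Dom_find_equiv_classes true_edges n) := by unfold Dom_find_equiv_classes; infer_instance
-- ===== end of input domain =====

-- B replaces A's union-find forest (parent/rank arrays, find loop with path halving, union
-- by rank, then a per-class min/sort pass) by a quick-find label array merged by wholesale
-- relabeling per mutual edge and read off in one ascending pass; equal output on Pre_
-- (mutual-edge endpoints in the node range 0..n).

-- ===== PORT A =====
-- while parent[x] != x: parent[x] = parent[parent[x]]; x = parent[x]
-- fuel only makes the loop total; under Pre_ it never runs out (proved below).
def pvFindLoop : Nat → List Int → Int → List Int × Int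
  | 0, parent, x => (parent, x)
  | fuel+1, parent, x =>
    match PySem.List.pyGet? parent x with
    | none => (parent, x)          -- IndexError; outside Pre_
    | some px =>
      if px = x then (parent, x)
      else
        match PySem.List.pyGet? parent px with
        | none => (parent, x)      -- IndexError; outside Pre_
        | some v => pvFindLoop fuel (PySem.List.pySetD parent x v) v

def pvFind (parent : List Int) (x : Int) : List Int × Int :=
  pvFindLoop (parent.length + 1) parent x

def pvUnion (parent rank : List Int) (a b : Int) : List Int × List Int :=
  let fa := pvFind parent a
  let fb := pvFind fa.1 b
  if fa.2 = fb.2 then (fb.1, rank)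
  else
    let ab := if PySem.List.pyGetD rank fa.2 0 < PySem.List.pyGetD rank fb.2 0
              then (fb.2, fa.2) else (fa.2, fb.2)
    let parent3 := PySem.List.pySetD fb.1 ab.2 ab.1
    let rank3 := if PySem.List.pyGetD rank ab.1 0 = PySem.List.pyGetD rank ab.2 0
                 then PySem.List.pySetD rank ab.1 (PySem.List.pyGetD rank ab.1 0 + 1) else rank
    (parent3, rank3)

def find_equiv_classes (true_edges : List (Int × Int)) (n : Int) : List (Int × List Int) :=
  let parent0 := PySem.List.pyRange 0 (n+1) 1
  let rank0 := List.replicate (n+1).toNat (0 : Int)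
  let st := true_edges.foldl
    (fun (st : List Int × List Int) p =>
      if p.1 ≠ p.2 ∧ (p.2, p.1) ∈ true_edges then pvUnion st.1 st.2 p.1 p.2 else st)
    (parent0, rank0)
  let cl := (PySem.List.pyRange 1 (n+1) 1).foldl
    (fun (st : List Int × PySem.Dict Int (PySem.Set Int)) i =>
      let f := pvFind st.1 i
      (f.1, st.2.modify f.2 PySem.Set.empty (fun s => PySem.Set.add s i)))
    (st.1, PySem.Dict.empty)
  let res := cl.2.values.foldl
    (fun (r : PySem.Dict Int (List Int)) members =>
      match PySem.List.min? members (fun x => x) with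
      | some rep => r.insert rep (PySem.List.sorted members (fun x => x) false)
      | none => r)          -- min() of an empty set raises; never reached
    PySem.Dict.empty
  res.items

-- ===== PORT B =====
def find_equiv_classes_alt (true_edges : List (Int × Int)) (n : Int) : List (Int × List Int) :=
  let edge_set := PySem.Set.ofList true_edges
  let label := true_edges.foldl
    (fun (lab : List Int) p =>
      if p.1 ≠ p.2 ∧ (p.2, p.1) ∈ edge_set then
        -- la, lb = label[i], label[j]  (IndexError on the none branches; outside Pre_)
        match PySem.List.pyGet? lab p.1, PySem.List.pyGet? lab p.2 with
        | some la, some lb =>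
          if la = lb then lab else lab.map (fun v => if v = lb then la else v)
        | _, _ => lab
      else lab)
    (PySem.List.pyRange 0 (n+1) 1)
  let groups := (PySem.List.pyRange 1 (n+1) 1).foldl
    (fun (g : PySem.Dict Int (List Int)) v =>
      g.modify (PySem.List.pyGetD label v 0) [] (fun l => l ++ [v]))
    PySem.Dict.empty
  (groups.values.foldl
    (fun (r : PySem.Dict Int (List Int)) g => r.insert (PySem.List.pyGetD g 0 0) g)
    PySem.Dict.empty).items

-- ===== PRECONDITION & SPEC =====
-- Pre_ requires the endpoints of mutual edges (the only ones the programs act on) to lie in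
-- 0..n, the index range of the parent/label arrays and the function's natural node domain:
-- ids beyond -(n+1)..n make both programs raise IndexError, and other negative ids lie
-- outside the node domain 1..n, reaching cells only through Python's negative-index
-- aliasing (excluded as out of domain, not because the programs disagree there).
def Pre_find_equiv_classes (true_edges : List (Int × Int)) (n : Int) : Prop :=
  ∀ p ∈ true_edges, (p.1 ≠ p.2 ∧ (p.2, p.1) ∈ true_edges) →
    (0 ≤ p.1 ∧ p.1 ≤ n ∧ 0 ≤ p.2 ∧ p.2 ≤ n)
instance (true_edges : List (Int × Int)) (n : Int) : Decidable (Pre_find_equiv_classes true_edges n) := by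
  unfold Pre_find_equiv_classes; infer_instance
def pvWitness_find_equiv_classes : (List (Int × Int)) × Int := ([(1, 2), (2, 1)], 3)

def Spec_find_equiv_classes (true_edges : List (Int × Int)) (n : Int) (out : List (Int × List Int)) : Prop :=
  out = find_equiv_classes_alt true_edges n
instance (true_edges : List (Int × Int)) (n : Int) (out : List (Int × List Int)) : Decidable (Spec_find_equiv_classes true_edges n out) := by
  unfold Spec_find_equiv_classes; infer_instance

-- ===== CLAIM (what is proved, stated in full; the proofs are below) =====
def Claim_equal_find_equiv_classes : Prop := ∀ (true_edges : List (Int × Int)) (n : Int), Dom_find_equiv_classes true_edges n → Pre_find_equiv_classes true_edges n → Spec_find_equiv_classes true_edges n (find_equiv_classes true_edges n)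

-- ===== LEMMAS AND PROOFS =====

-- the parent list as a cell function on Nat indices
def pfn (P : List Int) (c : Nat) : Nat := (P.getD c 0).toNat
-- the root of c in the forest (L-fold iteration reaches the root; proved under WFP)
def prt (P : List Int) (c : Nat) : Nat := (pfn P)^[P.length] c
-- well-formedness of the union-find state: in-range nonneg cells, rank strictly
-- increasing along non-trivial parent pointers
def WFP (P R : List Int) : Prop :=
  R.length = P.length ∧
  ∀ c, c < P.length →
    0 ≤ P.getD c 0 ∧ pfn P c < P.length ∧
    (pfn P c ≠ c → R.getD c 0 < R.getD (pfn P c) 0)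

-- B's label array as a cell function on Nat indices
def labB (lab : List Int) (c : Nat) : Int := lab.getD c 0

theorem getD_set_lem (P : List Int) (c : Nat) (v : Int) (hc : c < P.length) (d : Nat) :
    (P.set c v).getD d 0 = if d = c then v else P.getD d 0 := by
  simp only [List.getD_eq_getElem?_getD, List.getElem?_set]
  split
  · next h => subst h; simp
  · next h => rw [if_neg (fun hdc => h hdc.symm)]

theorem pfn_set (P : List Int) (c : Nat) (v : Int) (hc : c < P.length) (d : Nat) :
    pfn (P.set c v) d = if d = c then v.toNat else pfn P d := by
  unfold pfn; rw [getD_set_lem P c v hc d]; split <;> rfl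

theorem wfp_iter_lt {P R : List Int} (h : WFP P R) {c : Nat} (hc : c < P.length) :
    ∀ k, (pfn P)^[k] c < P.length := by
  intro k; induction k with
  | zero => simpa
  | succ k ih => rw [Function.iterate_succ_apply']; exact ((h.2 _ ih).2.1)

theorem wfp_rank_le {P R : List Int} (h : WFP P R) {c : Nat} (hc : c < P.length) :
    ∀ k, R.getD c 0 ≤ R.getD ((pfn P)^[k] c) 0 := by
  intro k; induction k with
  | zero => simp
  | succ k ih =>
    rw [Function.iterate_succ_apply']
    rcases eq_or_ne (pfn P ((pfn P)^[k] c)) ((pfn P)^[k] c) with he | hne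
    · rw [he]; exact ih
    · exact le_trans ih (le_of_lt (((h.2 _ (wfp_iter_lt h hc k)).2.2) hne))

theorem wfp_rank_strict {P R : List Int} (h : WFP P R) {c : Nat} (hc : c < P.length)
    {K : Nat} (hnf : ∀ t, t ≤ K → pfn P ((pfn P)^[t] c) ≠ (pfn P)^[t] c) :
    ∀ m k, m < k → k ≤ K + 1 → R.getD ((pfn P)^[m] c) 0 < R.getD ((pfn P)^[k] c) 0 := by
  intro m k hmk hk
  induction k with
  | zero => omega
  | succ k ih =>
    have hstep : R.getD ((pfn P)^[k] c) 0 < R.getD ((pfn P)^[k+1] c) 0 := by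
      rw [Function.iterate_succ_apply']
      exact ((h.2 _ (wfp_iter_lt h hc k)).2.2) (hnf k (by omega))
    rcases Nat.lt_or_ge m k with hm | hm
    · exact lt_trans (ih hm (by omega)) hstep
    · have : m = k := by omega
      subst this; exact hstep

theorem prt_fix {P R : List Int} (h : WFP P R) {c : Nat} (hc : c < P.length) :
    pfn P (prt P c) = prt P c := by
  by_contra hcon
  -- then no t ≤ P.length is a fixed point index
  have hnf : ∀ t, t ≤ P.length → pfn P ((pfn P)^[t] c) ≠ (pfn P)^[t] c := by
    intro t ht hfix
    have : (pfn P)^[P.length] c = (pfn P)^[t] c := by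
      have : P.length = t + (P.length - t) := by omega
      rw [this, Nat.add_comm, Function.iterate_add_apply]
      exact Function.iterate_fixed hfix _
    exact hcon (by rw [prt, this, hfix])
  -- injective map Fin (len+1) → Fin len
  have hlen0 : 0 < P.length := by omega
  have hinj : Function.Injective (fun t : Fin (P.length + 1) => (⟨(pfn P)^[t.1] c, wfp_iter_lt h hc t.1⟩ : Fin P.length)) := by
    intro t1 t2 heq
    simp only [Fin.mk.injEq] at heq
    by_contra hne
    rcases Nat.lt_or_ge t1.1 t2.1 with hlt | hge
    · have := wfp_rank_strict h hc (K := P.length - 1) (fun t ht => hnf t (by omega)) t1.1 t2.1 hlt (by omega)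
      rw [heq] at this; omega
    · have hlt : t2.1 < t1.1 := by
        rcases Nat.lt_or_ge t2.1 t1.1 with h' | h'
        · exact h'
        · exact absurd (Fin.ext (by omega)) hne
      have := wfp_rank_strict h hc (K := P.length - 1) (fun t ht => hnf t (by omega)) t2.1 t1.1 hlt (by omega)
      rw [heq] at this; omega
  have := Fintype.card_le_of_injective _ hinj
  simp at this


theorem prt_of_fix {P : List Int} {d : Nat} (h : pfn P d = d) : prt P d = d :=
  Function.iterate_fixed h _

theorem prt_lt {P R : List Int} (h : WFP P R) {c : Nat} (hc : c < P.length) :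
    prt P c < P.length := wfp_iter_lt h hc _

theorem prt_shift {P R : List Int} (h : WFP P R) {c : Nat} (hc : c < P.length) :
    prt P (pfn P c) = prt P c := by
  have h1 : prt P (pfn P c) = (pfn P)^[P.length + 1] c := by
    rw [prt, ← Function.iterate_succ_apply]
  rw [h1, Function.iterate_succ_apply']
  exact prt_fix h hc

theorem prt_fix_prt {P R : List Int} (h : WFP P R) {c : Nat} (hc : c < P.length) :
    prt P (prt P c) = prt P c := prt_of_fix (prt_fix h hc)

-- transfer of roots to a modified array
theorem prt_eq_of_ptwise {P R P' R' : List Int} (h : WFP P R) (h' : WFP P' R')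
    (hlen : P'.length = P.length)
    (H1 : ∀ d, d < P.length → pfn P' d ≠ d → prt P (pfn P' d) = prt P d)
    (H2 : ∀ d, d < P.length → pfn P' d = d → pfn P d = d) :
    ∀ d, d < P.length → prt P' d = prt P d := by
  suffices haux : ∀ K d, d < P.length →
      pfn P' ((pfn P')^[K] d) = (pfn P')^[K] d → prt P' d = prt P d by
    intro d hd
    exact haux P'.length d hd (prt_fix h' (by omega))
  intro K
  induction K with
  | zero =>
    intro d hd hfix
    simp only [Function.iterate_zero_apply] at hfix
    rw [prt_of_fix hfix, prt_of_fix (H2 d hd hfix)]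
  | succ K ih =>
    intro d hd hfix
    rcases eq_or_ne (pfn P' d) d with he | hne
    · rw [prt_of_fix he, prt_of_fix (H2 d hd he)]
    · have hd' : pfn P' d < P.length := by
        have := (h'.2 d (by omega)).2.1; omega
      have hfix' : pfn P' ((pfn P')^[K] (pfn P' d)) = (pfn P')^[K] (pfn P' d) := by
        have e : (pfn P')^[K] (pfn P' d) = (pfn P')^[K+1] d :=
          (Function.iterate_succ_apply (pfn P') K d).symm
        rw [e]; exact hfix
      calc prt P' d = prt P' (pfn P' d) := (prt_shift h' (by omega)).symm
        _ = prt P (pfn P' d) := ih _ hd' hfix'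
        _ = prt P d := H1 d hd hne

-- path halving preserves well-formedness
theorem halve_wfp {P R : List Int} (h : WFP P R) {c : Nat} (hc : c < P.length) :
    WFP (P.set c (P.getD (pfn P c) 0)) R := by
  have hfc : pfn P c < P.length := (h.2 c hc).2.1
  refine ⟨by simpa using h.1, ?_⟩
  intro d hd
  simp only [List.length_set] at hd
  have hset := pfn_set P c (P.getD (pfn P c) 0) hc d
  have hv : (P.getD (pfn P c) 0).toNat = pfn P (pfn P c) := rfl
  rcases eq_or_ne d c with he | hne
  · rw [getD_set_lem P c _ hc, hset, if_pos he, if_pos he, hv, List.length_set, he]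
    have h1 := h.2 c hc
    have h2 := h.2 (pfn P c) hfc
    refine ⟨h2.1, h2.2.1, ?_⟩
    intro hne2
    rcases eq_or_ne (pfn P c) c with hec | hnec
    · rw [hec] at hne2 ⊢; exact (h1.2.2 hne2)
    · have ha := h1.2.2 hnec
      rcases eq_or_ne (pfn P (pfn P c)) (pfn P c) with he2 | hne3
      · rw [he2]; exact ha
      · exact lt_trans ha (h2.2.2 hne3)
  · rw [getD_set_lem P c _ hc, hset, if_neg hne, if_neg hne, List.length_set]
    exact h.2 d hd


theorem find_ok : ∀ (fuel : Nat) (P R : List Int) (c K : Nat),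
    WFP P R → c < P.length →
    pfn P ((pfn P)^[K] c) = (pfn P)^[K] c → K < fuel →
    ∃ P', pvFindLoop fuel P (c : Int) = (P', ((prt P c : Nat) : Int)) ∧ WFP P' R ∧
      P'.length = P.length ∧ ∀ d, d < P.length → prt P' d = prt P d := by
  intro fuel
  induction fuel with
  | zero => intro P R c K h hc hfix hK; omega
  | succ fuel ih =>
    intro P R c K h hc hfix hK
    have hget : PySem.List.pyGet? P (c : Int) = some (P.getD c 0) := by
      rw [PySem.List.pyGet?_natCast]
      simp [List.getElem?_eq_getElem hc, List.getD_eq_getElem?_getD]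
    have hpx0 : 0 ≤ P.getD c 0 := (h.2 c hc).1
    have hpxt : (P.getD c 0).toNat = pfn P c := rfl
    rcases eq_or_ne (pfn P c) c with hcc | hcc
    · -- already a root
      have hpxc : P.getD c 0 = (c : Int) := by
        have := Int.toNat_of_nonneg hpx0; rw [hpxt, hcc] at this; omega
      refine ⟨P, ?_, h, rfl, fun d _ => rfl⟩
      rw [prt_of_fix hcc]
      simp only [pvFindLoop, hget]
      rw [if_pos hpxc]
    · have hpxc : P.getD c 0 ≠ (c : Int) := by
        intro he; exact hcc (by rw [← hpxt, he]; omega)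
      have hd1 : pfn P c < P.length := (h.2 c hc).2.1
      have hget2 : PySem.List.pyGet? P (P.getD c 0) = some (P.getD (pfn P c) 0) := by
        have e : P.getD c 0 = ((pfn P c : Nat) : Int) := by
          rw [← hpxt]; omega
        rw [e, PySem.List.pyGet?_natCast]
        simp [List.getElem?_eq_getElem hd1, List.getD_eq_getElem?_getD]
      have hv0 : 0 ≤ P.getD (pfn P c) 0 := (h.2 _ hd1).1
      have hvt : (P.getD (pfn P c) 0).toNat = pfn P (pfn P c) := rfl
      have hc2 : pfn P (pfn P c) < P.length := (h.2 _ hd1).2.1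
      have hvc2 : P.getD (pfn P c) 0 = ((pfn P (pfn P c) : Nat) : Int) := by
        rw [← hvt]; omega
      have hKne : K ≠ 0 := by
        intro he; rw [he] at hfix; exact hcc hfix
      -- the modified array
      have hwf' : WFP (P.set c (P.getD (pfn P c) 0)) R := halve_wfp h hc
      have hlen' : (P.set c (P.getD (pfn P c) 0)).length = P.length := List.length_set ..
      set P' := P.set c (P.getD (pfn P c) 0) with hP'
      have hpfn' : ∀ d, pfn P' d = if d = c then pfn P (pfn P c) else pfn P d := by
        intro d; rw [hP', pfn_set P c _ hc d, hvt]
      have hprt_eq : ∀ d, d < P.length → prt P' d = prt P d := by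
        refine prt_eq_of_ptwise h hwf' hlen' ?_ ?_
        · intro d hd hne
          rw [hpfn']
          rcases eq_or_ne d c with he | hdc
          · rw [if_pos he, he, prt_shift h hd1, prt_shift h hc]
          · rw [if_neg hdc, prt_shift h hd]
        · intro d hd hfixd
          rw [hpfn'] at hfixd
          rcases eq_or_ne d c with he | hdc
          · rw [if_pos he, he] at hfixd
            rw [he]
            exfalso
            have hrc : R.getD c 0 < R.getD (pfn P c) 0 := (h.2 c hc).2.2 hcc
            rcases eq_or_ne (pfn P (pfn P c)) (pfn P c) with he2 | hne3
            · rw [hfixd] at he2; exact hcc he2.symm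
            · have := (h.2 _ hd1).2.2 hne3
              rw [hfixd] at this; omega
          · rwa [if_neg hdc] at hfixd
      -- avoid c on the chain from c2
      have havoid : ∀ m, (pfn P)^[m] (pfn P (pfn P c)) ≠ c := by
        intro m he
        have h1 : R.getD c 0 < R.getD (pfn P c) 0 := (h.2 c hc).2.2 hcc
        have h2 := wfp_rank_le h hd1 (m + 1)
        rw [Function.iterate_succ_apply] at h2
        rw [he] at h2; omega
      have htrans : ∀ m, (pfn P')^[m] (pfn P (pfn P c)) = (pfn P)^[m] (pfn P (pfn P c)) := by
        intro m; induction m with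
        | zero => rfl
        | succ m ihm =>
          rw [Function.iterate_succ_apply', Function.iterate_succ_apply', ihm, hpfn',
            if_neg (havoid m)]
      -- a fix index for c2 with respect to P
      have hKP : ∃ K2, K2 < fuel ∧
          pfn P ((pfn P)^[K2] (pfn P (pfn P c))) = (pfn P)^[K2] (pfn P (pfn P c)) := by
        rcases eq_or_ne (pfn P (pfn P c)) (pfn P c) with he | hne
        · exact ⟨0, by omega, by simpa [he] using he⟩
        · have hK2 : 2 ≤ K := by
            rcases Nat.lt_or_ge K 2 with h2 | h2
            · interval_cases K
              · omega
              · exfalso; exact hne (by simpa using hfix)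
            · exact h2
          refine ⟨K - 2, by omega, ?_⟩
          have e : (pfn P)^[K - 2] (pfn P (pfn P c)) = (pfn P)^[K] c := by
            have e2 : (pfn P)^[2] c = pfn P (pfn P c) := by
              simp [Function.iterate_succ_apply']
            rw [← e2, ← Function.iterate_add_apply]
            congr 1; omega
          rw [e]; exact hfix
      rcases hKP with ⟨K2, hK2f, hK2fix⟩
      have hfix' : pfn P' ((pfn P')^[K2] (pfn P (pfn P c))) = (pfn P')^[K2] (pfn P (pfn P c)) := by
        rw [htrans, hpfn', if_neg (havoid K2)]; exact hK2fix
      obtain ⟨P'', hrun, hwf'', hlen'', hprt''⟩ :=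
        ih P' R (pfn P (pfn P c)) K2 hwf' (by omega) hfix' hK2f
      refine ⟨P'', ?_, hwf'', by omega, ?_⟩
      · have hrw : prt P' (pfn P (pfn P c)) = prt P c := by
          rw [hprt_eq _ hc2, prt_shift h hd1, prt_shift h hc]
        simp only [pvFindLoop, hget, if_neg hpxc, hget2]
        rw [PySem.List.pySetD_natCast] at *
        rw [hvc2, ← hP'] at *
        rw [hrun, hrw]
      · intro d hd
        rw [hprt'' d (by omega), hprt_eq d hd]

theorem pvFind_ok (P R : List Int) (c : Nat) (h : WFP P R) (hc : c < P.length) :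
    ∃ P', pvFind P (c : Int) = (P', ((prt P c : Nat) : Int)) ∧ WFP P' R ∧
      P'.length = P.length ∧ ∀ d, d < P.length → prt P' d = prt P d := by
  exact find_ok (P.length + 1) P R c P.length h hc (prt_fix h hc) (by omega)


theorem prt_self_fix {P R : List Int} (h : WFP P R) {c : Nat} (hc : c < P.length)
    (hp : prt P c = c) : pfn P c = c := by
  by_contra hne
  have h1 : R.getD c 0 < R.getD (pfn P c) 0 := (h.2 c hc).2.2 hne
  have h2 := wfp_rank_le h ((h.2 c hc).2.1) P.length
  have h3 : (pfn P)^[P.length] (pfn P c) = prt P (pfn P c) := rfl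
  rw [h3, prt_shift h hc, hp] at h2
  omega

theorem wfp_set_root_rank {P R : List Int} (h : WFP P R) {a' b' : Nat}
    (ha : a' < P.length) (hb : b' < P.length)
    (hfa : pfn P a' = a') (hfb : pfn P b' = b') (hab : a' ≠ b')
    (hr : R.getD b' 0 < R.getD a' 0) : WFP (P.set b' ((a' : Nat) : Int)) R := by
  refine ⟨by simpa using h.1, ?_⟩
  intro d hd
  simp only [List.length_set] at hd ⊢
  have hset := pfn_set P b' ((a' : Nat) : Int) hb d
  simp only [Int.toNat_natCast] at hset
  rw [getD_set_lem P b' _ hb d, hset]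
  rcases eq_or_ne d b' with he | hne
  · rw [if_pos he, if_pos he, he]
    exact ⟨by omega, ha, fun _ => hr⟩
  · rw [if_neg hne, if_neg hne]
    exact h.2 d hd

theorem wfp_set_root_inc {P R : List Int} (h : WFP P R) {a' b' : Nat}
    (ha : a' < P.length) (hb : b' < P.length)
    (hfa : pfn P a' = a') (hfb : pfn P b' = b') (hab : a' ≠ b')
    (hre : R.getD a' 0 = R.getD b' 0) :
    WFP (P.set b' ((a' : Nat) : Int)) (R.set a' (R.getD a' 0 + 1)) := by
  have hra : a' < R.length := by rw [h.1]; exact ha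
  have hR2 : ∀ y : Nat, (R.set a' (R.getD a' 0 + 1)).getD y 0 =
      if y = a' then R.getD a' 0 + 1 else R.getD y 0 := fun y => getD_set_lem R a' _ hra y
  refine ⟨by simp [h.1], ?_⟩
  intro d hd
  simp only [List.length_set] at hd ⊢
  have hset := pfn_set P b' ((a' : Nat) : Int) hb d
  simp only [Int.toNat_natCast] at hset
  rw [getD_set_lem P b' _ hb d, hset]
  rcases eq_or_ne d b' with he | hne
  · rw [if_pos he, if_pos he, he]
    refine ⟨by omega, ha, fun _ => ?_⟩
    rw [hR2 a', hR2 b', if_pos rfl, if_neg (fun hx => hab hx.symm)]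
    omega
  · rw [if_neg hne, if_neg hne]
    obtain ⟨h1, h2, h3⟩ := h.2 d hd
    refine ⟨h1, h2, fun hne2 => ?_⟩
    rw [hR2 d, hR2 (pfn P d)]
    have hda : d ≠ a' := by
      intro he2; rw [he2] at hne2; exact hne2 hfa
    rw [if_neg hda]
    split
    · next hpd =>
      have := h3 hne2; rw [hpd] at this; omega
    · exact h3 hne2

theorem prt_set_root {P R R' : List Int} (h : WFP P R) {a' b' : Nat}
    (ha : a' < P.length) (hb : b' < P.length)
    (hfa : pfn P a' = a') (hfb : pfn P b' = b') (hab : a' ≠ b')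
    (h3 : WFP (P.set b' ((a' : Nat) : Int)) R') :
    ∀ d, d < P.length →
      prt (P.set b' ((a' : Nat) : Int)) d = if prt P d = b' then a' else prt P d := by
  have hlen3 : (P.set b' ((a' : Nat) : Int)).length = P.length := List.length_set ..
  have hpfn3 : ∀ d, pfn (P.set b' ((a' : Nat) : Int)) d = if d = b' then a' else pfn P d := by
    intro d
    rw [pfn_set P b' _ hb d]; simp
  suffices haux : ∀ K d, d < P.length →
      pfn (P.set b' ((a' : Nat) : Int)) ((pfn (P.set b' ((a' : Nat) : Int)))^[K] d) =
        (pfn (P.set b' ((a' : Nat) : Int)))^[K] d →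
      prt (P.set b' ((a' : Nat) : Int)) d = if prt P d = b' then a' else prt P d by
    intro d hd
    exact haux _ d hd (prt_fix h3 (by omega))
  intro K
  induction K with
  | zero =>
    intro d hd hfix
    simp only [Function.iterate_zero_apply] at hfix
    have hdb : d ≠ b' := by
      intro he; rw [hpfn3, if_pos he] at hfix; exact hab (he ▸ hfix)
    rw [hpfn3, if_neg hdb] at hfix
    rw [prt_of_fix (by rw [hpfn3, if_neg hdb]; exact hfix), prt_of_fix hfix,
      if_neg hdb]
  | succ K ih =>
    intro d hd hfix
    rcases eq_or_ne (pfn (P.set b' ((a' : Nat) : Int)) d) d with he | hne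
    · have hdb : d ≠ b' := by
        intro heb; rw [hpfn3, if_pos heb] at he; exact hab (heb ▸ he)
      rw [hpfn3, if_neg hdb] at he
      rw [prt_of_fix (by rw [hpfn3, if_neg hdb]; exact he), prt_of_fix he, if_neg hdb]
    · have hstep : prt (P.set b' ((a' : Nat) : Int)) d =
          prt (P.set b' ((a' : Nat) : Int)) (pfn (P.set b' ((a' : Nat) : Int)) d) :=
        (prt_shift h3 (by omega)).symm
      have hd' : pfn (P.set b' ((a' : Nat) : Int)) d < P.length := by
        have := (h3.2 d (by omega)).2.1; omega
      have hfix' : pfn (P.set b' ((a' : Nat) : Int))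
          ((pfn (P.set b' ((a' : Nat) : Int)))^[K] (pfn (P.set b' ((a' : Nat) : Int)) d)) =
          (pfn (P.set b' ((a' : Nat) : Int)))^[K] (pfn (P.set b' ((a' : Nat) : Int)) d) := by
        have e := (Function.iterate_succ_apply (pfn (P.set b' ((a' : Nat) : Int))) K d).symm
        rw [e]; exact hfix
      rw [hstep, ih _ hd' hfix']
      rcases eq_or_ne d b' with heb | hneb
      · rw [hpfn3, if_pos heb, heb, prt_of_fix hfa, prt_of_fix hfb,
          if_neg hab, if_pos rfl]
      · rw [hpfn3, if_neg hneb, prt_shift h hd]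

theorem pvUnion_ok (P R : List Int) (a b : Nat) (h : WFP P R)
    (ha : a < P.length) (hb : b < P.length) :
    ∃ P' R' w, pvUnion P R ((a : Nat) : Int) ((b : Nat) : Int) = (P', R') ∧ WFP P' R' ∧
      P'.length = P.length ∧ (w = prt P a ∨ w = prt P b) ∧
      ∀ d, d < P.length → prt P' d =
        if prt P d = prt P a ∨ prt P d = prt P b then w else prt P d := by
  obtain ⟨P1, e1, hw1, hl1, hp1⟩ := pvFind_ok P R a h ha
  obtain ⟨P2, e2, hw2, hl2, hp2⟩ := pvFind_ok P1 R b hw1 (by omega)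
  have hprtb : prt P1 b = prt P b := hp1 b hb
  rw [hprtb] at e2
  have hprt2 : ∀ d, d < P.length → prt P2 d = prt P d := by
    intro d hd; rw [hp2 d (by omega), hp1 d hd]
  have hlen2 : P2.length = P.length := by omega
  rcases eq_or_ne (prt P a) (prt P b) with heq | hne
  · refine ⟨P2, R, prt P a, ?_, hw2, hlen2, Or.inl rfl, ?_⟩
    · simp only [pvUnion, e1, e2]
      rw [if_pos (by exact_mod_cast heq)]
    · intro d hd
      rw [hprt2 d hd]
      split
      · next hcase =>
        rcases hcase with hc1 | hc2
        · exact hc1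
        · rw [hc2]; exact heq.symm
      · rfl
  · have hrw : ∀ (r : Nat), r < P.length →
        PySem.List.pyGetD R ((r : Nat) : Int) 0 = R.getD r 0 := by
      intro r hr; simp
    have hra : prt P a < P.length := prt_lt h ha
    have hrb : prt P b < P.length := prt_lt h hb
    -- roots of P2
    have hfa2 : pfn P2 (prt P a) = prt P a :=
      prt_self_fix hw2 (by omega) (by rw [hprt2 _ hra, prt_fix_prt h ha])
    have hfb2 : pfn P2 (prt P b) = prt P b :=
      prt_self_fix hw2 (by omega) (by rw [hprt2 _ hrb, prt_fix_prt h hb])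
    have hcast : ((prt P a : Nat) : Int) ≠ ((prt P b : Nat) : Int) := by
      exact_mod_cast fun he => hne (by exact_mod_cast he)
    rcases lt_or_ge (R.getD (prt P a) 0) (R.getD (prt P b) 0) with hlt | hge
    · -- b-root wins, rank unchanged
      have hwf3 : WFP (P2.set (prt P a) ((prt P b : Nat) : Int)) R :=
        wfp_set_root_rank hw2 (by omega) (by omega) hfb2 hfa2 (Ne.symm hne) hlt
      refine ⟨P2.set (prt P a) ((prt P b : Nat) : Int), R, prt P b, ?_, hwf3,
        by simp [hlen2], Or.inr rfl, ?_⟩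
      · simp only [pvUnion, e1, e2]
        rw [if_neg hcast]
        have hcond : PySem.List.pyGetD R ((prt P a : Nat) : Int) 0 <
            PySem.List.pyGetD R ((prt P b : Nat) : Int) 0 := by
          rw [hrw _ hra, hrw _ hrb]; exact hlt
        rw [if_pos hcond]
        dsimp only
        have hcond2 : ¬ PySem.List.pyGetD R ((prt P b : Nat) : Int) 0 =
            PySem.List.pyGetD R ((prt P a : Nat) : Int) 0 := by
          rw [hrw _ hra, hrw _ hrb]; omega
        rw [if_neg hcond2, PySem.List.pySetD_natCast]
      · intro d hd
        have hform := prt_set_root hw2 (a' := prt P b) (b' := prt P a) (by omega) (by omega)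
          hfb2 hfa2 (Ne.symm hne) hwf3 d (by omega)
        rw [hform, hprt2 d hd]
        by_cases h1 : prt P d = prt P a
        · rw [if_pos h1, if_pos (Or.inl h1)]
        · by_cases h2 : prt P d = prt P b
          · rw [if_neg h1, if_pos (Or.inr h2)]; exact h2
          · rw [if_neg h1, if_neg (fun hor => hor.elim h1 h2)]
    · -- a-root wins
      rcases eq_or_ne (R.getD (prt P a) 0) (R.getD (prt P b) 0) with hre | hrne
      · have hwf3 : WFP (P2.set (prt P b) ((prt P a : Nat) : Int))
            (R.set (prt P a) (R.getD (prt P a) 0 + 1)) :=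
          wfp_set_root_inc hw2 (by omega) (by omega) hfa2 hfb2 hne hre
        refine ⟨P2.set (prt P b) ((prt P a : Nat) : Int),
          R.set (prt P a) (R.getD (prt P a) 0 + 1), prt P a, ?_, hwf3,
          by simp [hlen2], Or.inl rfl, ?_⟩
        · simp only [pvUnion, e1, e2]
          rw [if_neg hcast]
          have hcond : ¬ PySem.List.pyGetD R ((prt P a : Nat) : Int) 0 <
              PySem.List.pyGetD R ((prt P b : Nat) : Int) 0 := by
            rw [hrw _ hra, hrw _ hrb]; omega
          rw [if_neg hcond]
          dsimp only
          have hcond2 : PySem.List.pyGetD R ((prt P a : Nat) : Int) 0 =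
              PySem.List.pyGetD R ((prt P b : Nat) : Int) 0 := by
            rw [hrw _ hra, hrw _ hrb]; exact hre
          rw [if_pos hcond2, PySem.List.pySetD_natCast, PySem.List.pySetD_natCast,
            hrw _ hra]
        · intro d hd
          have hform := prt_set_root hw2 (a' := prt P a) (b' := prt P b) (by omega) (by omega)
            hfa2 hfb2 hne hwf3 d (by omega)
          rw [hform, hprt2 d hd]
          by_cases h2 : prt P d = prt P b
          · rw [if_pos h2, if_pos (Or.inr h2)]
          · by_cases h1 : prt P d = prt P a
            · rw [if_neg h2, if_pos (Or.inl h1)]; exact h1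
            · rw [if_neg h2, if_neg (fun hor => hor.elim h1 h2)]
      · have hlt2 : R.getD (prt P b) 0 < R.getD (prt P a) 0 := by omega
        have hwf3 : WFP (P2.set (prt P b) ((prt P a : Nat) : Int)) R :=
          wfp_set_root_rank hw2 (by omega) (by omega) hfa2 hfb2 hne hlt2
        refine ⟨P2.set (prt P b) ((prt P a : Nat) : Int), R, prt P a, ?_, hwf3,
          by simp [hlen2], Or.inl rfl, ?_⟩
        · simp only [pvUnion, e1, e2]
          rw [if_neg hcast]
          have hcond : ¬ PySem.List.pyGetD R ((prt P a : Nat) : Int) 0 <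
              PySem.List.pyGetD R ((prt P b : Nat) : Int) 0 := by
            rw [hrw _ hra, hrw _ hrb]; omega
          rw [if_neg hcond]
          dsimp only
          have hcond2 : ¬ PySem.List.pyGetD R ((prt P a : Nat) : Int) 0 =
              PySem.List.pyGetD R ((prt P b : Nat) : Int) 0 := by
            rw [hrw _ hra, hrw _ hrb]; exact hrne
          rw [if_neg hcond2, PySem.List.pySetD_natCast]
        · intro d hd
          have hform := prt_set_root hw2 (a' := prt P a) (b' := prt P b) (by omega) (by omega)
            hfa2 hfb2 hne hwf3 d (by omega)
          rw [hform, hprt2 d hd]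
          by_cases h2 : prt P d = prt P b
          · rw [if_pos h2, if_pos (Or.inr h2)]
          · by_cases h1 : prt P d = prt P a
            · rw [if_neg h2, if_pos (Or.inl h1)]; exact h1
            · rw [if_neg h2, if_neg (fun hor => hor.elim h1 h2)]

-- B's relabel step, cellwise
theorem labB_map (lab : List Int) (la lb : Int) (c : Nat) (hc : c < lab.length) :
    labB (lab.map (fun v => if v = lb then la else v)) c =
      if labB lab c = lb then la else labB lab c := by
  unfold labB
  simp only [List.getD_eq_getElem?_getD, List.getElem?_map,
    List.getElem?_eq_getElem hc]
  rfl

set_option maxHeartbeats 2000000 in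
theorem kernel_step (P P' : List Int) (f f' : Nat → Int) (L : Nat)
    (i j w : Nat) (hi : i < L) (hj : j < L)
    (hK : ∀ x y : Nat, x < L → y < L → (prt P x = prt P y ↔ f x = f y))
    (hw : w = prt P i ∨ w = prt P j)
    (hm : ∀ d, d < L → prt P' d = if prt P d = prt P i ∨ prt P d = prt P j then w else prt P d)
    (hl : ∀ y : Nat, y < L → f' y = if f y = f j then f i else f y) :
    ∀ x y : Nat, x < L → y < L → (prt P' x = prt P' y ↔ f' x = f' y) := by
  intro x y hx hy
  have aux1 : prt P' x = prt P' y ↔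
      (prt P x = prt P y ∨ ((prt P x = prt P i ∨ prt P x = prt P j) ∧
        (prt P y = prt P i ∨ prt P y = prt P j))) := by
    rw [hm x hx, hm y hy]
    by_cases mx : prt P x = prt P i ∨ prt P x = prt P j
    · by_cases my : prt P y = prt P i ∨ prt P y = prt P j
      · rw [if_pos mx, if_pos my]
        exact ⟨fun _ => Or.inr ⟨mx, my⟩, fun _ => rfl⟩
      · rw [if_pos mx, if_neg my]
        constructor
        · intro he
          exfalso; apply my
          rcases hw with hw | hw
          · exact Or.inl (he.symm.trans hw)
          · exact Or.inr (he.symm.trans hw)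
        · intro hor
          exfalso
          rcases hor with hbase | ⟨_, hmy⟩
          · apply my; rw [← hbase]; exact mx
          · exact my hmy
    · by_cases my : prt P y = prt P i ∨ prt P y = prt P j
      · rw [if_neg mx, if_pos my]
        constructor
        · intro he
          exfalso; apply mx
          rcases hw with hw | hw
          · exact Or.inl (he.trans hw)
          · exact Or.inr (he.trans hw)
        · intro hor
          exfalso
          rcases hor with hbase | ⟨hmx, _⟩
          · apply mx; rw [hbase]; exact my
          · exact mx hmx
      · rw [if_neg mx, if_neg my]
        constructor
        · exact fun h => Or.inl h
        · intro hor
          rcases hor with hbase | ⟨hmx, _⟩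
          · exact hbase
          · exact absurd hmx mx
  have aux2 : f' x = f' y ↔
      (f x = f y ∨ ((f x = f i ∨ f x = f j) ∧
        (f y = f i ∨ f y = f j))) := by
    rw [hl x hx, hl y hy]
    by_cases cx : f x = f j
    · by_cases cy : f y = f j
      · rw [if_pos cx, if_pos cy]
        exact ⟨fun _ => Or.inl (cx.trans cy.symm), fun _ => rfl⟩
      · rw [if_pos cx, if_neg cy]
        constructor
        · intro he
          exact Or.inr ⟨Or.inr cx, Or.inl he.symm⟩
        · intro hor
          rcases hor with hbase | ⟨_, hy1 | hy2⟩
          · exact absurd (hbase.symm.trans cx) cy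
          · exact hy1.symm
          · exact absurd hy2 cy
    · by_cases cy : f y = f j
      · rw [if_neg cx, if_pos cy]
        constructor
        · intro he
          exact Or.inr ⟨Or.inl he, Or.inr cy⟩
        · intro hor
          rcases hor with hbase | ⟨hx1 | hx2, _⟩
          · exact absurd (hbase.trans cy) cx
          · exact hx1
          · exact absurd hx2 cx
      · rw [if_neg cx, if_neg cy]
        constructor
        · exact fun h => Or.inl h
        · intro hor
          rcases hor with hbase | ⟨hx1 | hx2, hy1 | hy2⟩
          · exact hbase
          · exact hx1.trans hy1.symm
          · exact absurd hy2 cy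
          · exact absurd hx2 cx
          · exact absurd hx2 cx
  rw [aux1, aux2]
  exact or_congr (hK x y hx hy)
    (and_congr (or_congr (hK x i hx hi) (hK x j hx hj))
      (or_congr (hK y i hy hi) (hK y j hy hj)))

set_option maxHeartbeats 4000000 in
theorem phase1_inv (full : List (Int × Int)) (L : Nat)
    (hok : ∀ p ∈ full, (p.1 ≠ p.2 ∧ (p.2, p.1) ∈ full) →
      0 ≤ p.1 ∧ p.1.toNat < L ∧ 0 ≤ p.2 ∧ p.2.toNat < L) :
    ∀ (es : List (Int × Int)), (∀ p ∈ es, p ∈ full) →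
    ∀ (P R lab : List Int),
      WFP P R → P.length = L → lab.length = L →
      (∀ x y : Nat, x < L → y < L → (prt P x = prt P y ↔ labB lab x = labB lab y)) →
      WFP (es.foldl (fun (st : List Int × List Int) p =>
          if p.1 ≠ p.2 ∧ (p.2, p.1) ∈ full then pvUnion st.1 st.2 p.1 p.2 else st) (P, R)).1
        (es.foldl (fun (st : List Int × List Int) p =>
          if p.1 ≠ p.2 ∧ (p.2, p.1) ∈ full then pvUnion st.1 st.2 p.1 p.2 else st) (P, R)).2 ∧
      (es.foldl (fun (st : List Int × List Int) p =>
          if p.1 ≠ p.2 ∧ (p.2, p.1) ∈ full then pvUnion st.1 st.2 p.1 p.2 else st) (P, R)).1.length = L ∧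
      (es.foldl (fun (lab : List Int) p =>
          if p.1 ≠ p.2 ∧ (p.2, p.1) ∈ PySem.Set.ofList full then
            match PySem.List.pyGet? lab p.1, PySem.List.pyGet? lab p.2 with
            | some la, some lb =>
              if la = lb then lab else lab.map (fun v => if v = lb then la else v)
            | _, _ => lab
          else lab) lab).length = L ∧
      (∀ x y : Nat, x < L → y < L →
        (prt (es.foldl (fun (st : List Int × List Int) p =>
            if p.1 ≠ p.2 ∧ (p.2, p.1) ∈ full then pvUnion st.1 st.2 p.1 p.2 else st) (P, R)).1 x =
         prt (es.foldl (fun (st : List Int × List Int) p =>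
            if p.1 ≠ p.2 ∧ (p.2, p.1) ∈ full then pvUnion st.1 st.2 p.1 p.2 else st) (P, R)).1 y ↔
         labB (es.foldl (fun (lab : List Int) p =>
            if p.1 ≠ p.2 ∧ (p.2, p.1) ∈ PySem.Set.ofList full then
              match PySem.List.pyGet? lab p.1, PySem.List.pyGet? lab p.2 with
              | some la, some lb =>
                if la = lb then lab else lab.map (fun v => if v = lb then la else v)
              | _, _ => lab
            else lab) lab) x =
         labB (es.foldl (fun (lab : List Int) p =>
            if p.1 ≠ p.2 ∧ (p.2, p.1) ∈ PySem.Set.ofList full then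
              match PySem.List.pyGet? lab p.1, PySem.List.pyGet? lab p.2 with
              | some la, some lb =>
                if la = lb then lab else lab.map (fun v => if v = lb then la else v)
              | _, _ => lab
            else lab) lab) y)) := by
  intro es
  induction es with
  | nil =>
    intro _ P R lab hwf hlen hlab hK
    exact ⟨hwf, hlen, hlab, hK⟩
  | cons p es ih =>
    intro hsub P R lab hwf hlen hlab hK
    have hsub' : ∀ q ∈ es, q ∈ full := fun q hq => hsub q (List.mem_cons_of_mem p hq)
    simp only [List.foldl_cons]
    by_cases hg : p.1 ≠ p.2 ∧ (p.2, p.1) ∈ full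
    · have hgB : p.1 ≠ p.2 ∧ (p.2, p.1) ∈ PySem.Set.ofList full := by
        exact ⟨hg.1, (PySem.Set.mem_ofList _ _).2 hg.2⟩
      rw [if_pos hg, if_pos hgB]
      obtain ⟨h01, h0a, h02, h0b⟩ := hok p (hsub p List.mem_cons_self) hg
      have hp1 : p.1 = ((p.1.toNat : Nat) : Int) := by omega
      have hp2 : p.2 = ((p.2.toNat : Nat) : Int) := by omega
      obtain ⟨P', R', w, hun, hwf', hlen', hw, hform⟩ :=
        pvUnion_ok P R p.1.toNat p.2.toNat hwf (by omega) (by omega)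
      have hun2 : pvUnion P R p.1 p.2 = (P', R') := by rw [hp1, hp2]; exact hun
      rw [hun2]
      -- B side: the two reads are in range
      have hga : PySem.List.pyGet? lab p.1 = some (labB lab p.1.toNat) := by
        have h1 : PySem.List.pyGet? lab ((p.1.toNat : Nat) : Int) = lab[p.1.toNat]? :=
          PySem.List.pyGet?_natCast lab p.1.toNat
        rw [← hp1] at h1
        rw [h1, List.getElem?_eq_getElem (show p.1.toNat < lab.length by omega)]
        unfold labB
        rw [List.getD_eq_getElem?_getD,
          List.getElem?_eq_getElem (show p.1.toNat < lab.length by omega)]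
        rfl
      have hgb : PySem.List.pyGet? lab p.2 = some (labB lab p.2.toNat) := by
        have h1 : PySem.List.pyGet? lab ((p.2.toNat : Nat) : Int) = lab[p.2.toNat]? :=
          PySem.List.pyGet?_natCast lab p.2.toNat
        rw [← hp2] at h1
        rw [h1, List.getElem?_eq_getElem (show p.2.toNat < lab.length by omega)]
        unfold labB
        rw [List.getD_eq_getElem?_getD,
          List.getElem?_eq_getElem (show p.2.toNat < lab.length by omega)]
        rfl
      rw [hga, hgb]
      dsimp only
      by_cases heq : labB lab p.1.toNat = labB lab p.2.toNat
      · rw [if_pos heq]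
        -- equal labels means equal roots; the union is a no-op on the partition
        have hroots : prt P p.1.toNat = prt P p.2.toNat := by
          rw [hK p.1.toNat p.2.toNat (by omega) (by omega)]
          exact heq
        have hprtid : ∀ x, x < L → prt P' x = prt P x := by
          intro x hx
          rw [hform x (by omega)]
          split
          · next hc =>
            rcases hc with hc | hc
            · rcases hw with hw | hw
              · rw [hw, hc]
              · rw [hw, ← hroots, hc]
            · rcases hw with hw | hw
              · rw [hw, hroots, hc]
              · rw [hw, hc]
          · rfl
        have hK' : ∀ x y : Nat, x < L → y < L →
            (prt P' x = prt P' y ↔ labB lab x = labB lab y) := by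
          intro x y hx hy
          rw [hprtid x hx, hprtid y hy]
          exact hK x y hx hy
        exact ih hsub' P' R' lab hwf' (by omega) hlab hK'
      · rw [if_neg heq]
        have hlab' : (lab.map (fun v => if v = labB lab p.2.toNat then labB lab p.1.toNat else v)).length = L := by
          simp [hlab]
        have hK' := kernel_step P P' (labB lab)
          (labB (lab.map (fun v => if v = labB lab p.2.toNat then labB lab p.1.toNat else v)))
          L p.1.toNat p.2.toNat w (by omega) (by omega) hK hw
          (fun x hx => hform x (by omega))
          (fun y hy => labB_map lab (labB lab p.1.toNat) (labB lab p.2.toNat) y (by omega))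
        exact ih hsub' P' R' _ hwf' (by omega) hlab' hK'
    · have hgB : ¬ (p.1 ≠ p.2 ∧ (p.2, p.1) ∈ PySem.Set.ofList full) := by
        intro hc
        exact hg ⟨hc.1, (PySem.Set.mem_ofList _ _).1 hc.2⟩
      rw [if_neg hg, if_neg hgB]
      exact ih hsub' P R lab hwf hlen hlab hK


-- phase-2 invariant: after grouping 1..v-1, both dicts carry the same group list gs,
-- A keyed by the root, B keyed by the label
def Inv2 (L : Nat) (Rf : List Int) (lab : List Int) (v : Int) (P : List Int)
    (classes : PySem.Dict Int (PySem.Set Int)) (groups : PySem.Dict Int (List Int))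
    (gs : List (List Int)) : Prop :=
  WFP P Rf ∧ P.length = L ∧
  (∀ x y : Nat, x < L → y < L → (prt P x = prt P y ↔ labB lab x = labB lab y)) ∧
  classes.items = gs.map (fun g => (((prt P g.headI.toNat : Nat) : Int), g)) ∧
  groups.items = gs.map (fun g => (labB lab g.headI.toNat, g)) ∧
  (∀ g ∈ gs, g ≠ [] ∧ g.Pairwise (· < ·) ∧
    ∀ m ∈ g, 1 ≤ m ∧ m < v ∧ prt P m.toNat = prt P g.headI.toNat) ∧
  gs.Pairwise (fun g h => prt P g.headI.toNat ≠ prt P h.headI.toNat) ∧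
  (∀ m : Int, 1 ≤ m → m < v → ∃ g ∈ gs, m ∈ g)

theorem headI_append_singleton {g : List Int} (hg : g ≠ []) (v : Int) :
    (g ++ [v]).headI = g.headI := by
  cases g with
  | nil => exact absurd rfl hg
  | cons a t => rfl

theorem headI_mem {g : List Int} (hg : g ≠ []) : g.headI ∈ g := by
  cases g with
  | nil => exact absurd rfl hg
  | cons a t => exact List.mem_cons_self

set_option maxHeartbeats 2000000 in
theorem phase2_step (n : Int) (L : Nat) (Rf : List Int) (lab : List Int)
    (v : Int) (P : List Int) (classes : PySem.Dict Int (PySem.Set Int))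
    (groups : PySem.Dict Int (List Int)) (gs : List (List Int))
    (hInv : Inv2 L Rf lab v P classes groups gs) (hv1 : 1 ≤ v) (hvn : v ≤ n)
    (hL : L = (n+1).toNat) (hlab : lab.length = L) :
    ∃ gs', Inv2 L Rf lab (v+1) (pvFind P v).1
      (classes.modify (pvFind P v).2 PySem.Set.empty (fun s => PySem.Set.add s v))
      (groups.modify (PySem.List.pyGetD lab v 0) [] (fun l => l ++ [v])) gs' := by
  obtain ⟨hwf, hlen, hK, hic, hig, hmem, hpw, hcomp⟩ := hInv
  have hc : v.toNat < L := by omega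
  have hvc : v = ((v.toNat : Nat) : Int) := by omega
  obtain ⟨P', hfind, hwf', hlen', hp'⟩ := pvFind_ok P Rf v.toNat hwf (by omega)
  have hfind2 : pvFind P v = (P', ((prt P v.toNat : Nat) : Int)) := by rw [hvc]; exact hfind
  rw [hfind2]
  have hkey : PySem.List.pyGetD lab v 0 = labB lab v.toNat := by
    rw [hvc, PySem.List.pyGetD_natCast]; rfl
  rw [hkey]
  show ∃ gs', Inv2 L Rf lab (v+1) P'
    (classes.modify ((prt P v.toNat : Nat) : Int) PySem.Set.empty (fun s => PySem.Set.add s v))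
    (groups.modify (labB lab v.toNat) [] (fun l => l ++ [v])) gs'
  have hp'' : ∀ d, d < L → prt P' d = prt P d := fun d hd => hp' d (by omega)
  have hmemL : ∀ g ∈ gs, ∀ m ∈ g, m.toNat < L ∧ 1 ≤ m := by
    intro g hg m hm
    obtain ⟨_, _, hmm⟩ := hmem g hg
    obtain ⟨h1, h2, _⟩ := hmm m hm
    exact ⟨by omega, h1⟩
  have hheadL : ∀ g ∈ gs, g.headI.toNat < L := fun g hg =>
    (hmemL g hg g.headI (headI_mem (hmem g hg).1)).1
  have hhead1 : ∀ g ∈ gs, (1:Int) ≤ g.headI := fun g hg =>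
    (hmemL g hg g.headI (headI_mem (hmem g hg).1)).2
  -- kernel at a head and v
  have hkgv : ∀ g ∈ gs, (prt P g.headI.toNat = prt P v.toNat ↔ labB lab g.headI.toNat = labB lab v.toNat) := by
    intro g hg
    exact hK g.headI.toNat v.toNat (hheadL g hg) hc
  have hexiff : (∃ g ∈ gs, prt P g.headI.toNat = prt P v.toNat) ↔
      (∃ g ∈ gs, labB lab g.headI.toNat = labB lab v.toNat) := by
    constructor
    · rintro ⟨g, hg, he⟩
      exact ⟨g, hg, (hkgv g hg).1 he⟩
    · rintro ⟨g, hg, he⟩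
      exact ⟨g, hg, (hkgv g hg).2 he⟩
  -- contains characterizations
  have hcontc : classes.contains ((prt P v.toNat : Nat) : Int) = true ↔
      ∃ g ∈ gs, prt P g.headI.toNat = prt P v.toNat := by
    simp only [PySem.Dict.contains, hic, List.any_map, List.any_eq_true]
    constructor
    · rintro ⟨g, hg, hbeq⟩
      simp only [Function.comp, beq_iff_eq, Int.natCast_inj] at hbeq
      exact ⟨g, hg, hbeq⟩
    · rintro ⟨g, hg, he⟩
      exact ⟨g, hg, by simp [Function.comp, he]⟩
  have hcontg : groups.contains (labB lab v.toNat) = true ↔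
      ∃ g ∈ gs, labB lab g.headI.toNat = labB lab v.toNat := by
    simp only [PySem.Dict.contains, hig, List.any_map, List.any_eq_true]
    constructor
    · rintro ⟨g, hg, hbeq⟩
      simp only [Function.comp, beq_iff_eq] at hbeq
      exact ⟨g, hg, hbeq⟩
    · rintro ⟨g, hg, he⟩
      refine ⟨g, hg, ?_⟩
      simp only [Function.comp, beq_iff_eq]
      exact he
  -- nodup keys
  have hndc : classes.keys.Nodup := by
    have hkeys : classes.keys = gs.map (fun g => ((prt P g.headI.toNat : Nat) : Int)) := by
      simp only [PySem.Dict.keys, hic, List.map_map]; rfl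
    rw [hkeys]
    exact List.Pairwise.map _ (fun a b hab => by
      intro he; exact hab (by exact_mod_cast he)) hpw
  have hpwlab : gs.Pairwise (fun g h => labB lab g.headI.toNat ≠ labB lab h.headI.toNat) := by
    refine List.Pairwise.imp_of_mem ?_ hpw
    intro a b ha hb hr he
    apply hr
    exact (hK a.headI.toNat b.headI.toNat (hheadL a ha) (hheadL b hb)).2 he
  have hndg : groups.keys.Nodup := by
    have hkeys : groups.keys = gs.map (fun g => labB lab g.headI.toNat) := by
      simp only [PySem.Dict.keys, hig, List.map_map]; rfl
    rw [hkeys]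
    exact List.Pairwise.map _ (fun a b hab => hab) hpwlab
  -- new-P transfer helpers
  have hprt' : ∀ g ∈ gs, prt P' g.headI.toNat = prt P g.headI.toNat := fun g hg =>
    hp'' _ (hheadL g hg)
  by_cases hex : ∃ g ∈ gs, prt P g.headI.toNat = prt P v.toNat
  · -- v joins an existing group g₀
    obtain ⟨g₀, hg₀, he₀⟩ := hex
    have huniq : ∀ g ∈ gs, prt P g.headI.toNat = prt P v.toNat → g = g₀ := by
      intro g hg he
      by_contra hne
      exact List.Pairwise.forall (fun _ _ h he' => h he'.symm) hpw hg hg₀ hne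
        (he.trans he₀.symm)
    have hvnotin : v ∉ g₀ := by
      intro hvin
      obtain ⟨_, _, hmm⟩ := hmem g₀ hg₀
      obtain ⟨_, h2, _⟩ := hmm v hvin
      omega
    have hcin : (( ((prt P g₀.headI.toNat : Nat) : Int)), g₀) ∈ classes.items := by
      rw [hic]
      exact List.mem_map.2 ⟨g₀, hg₀, rfl⟩
    have hgetc : classes.getD ((prt P v.toNat : Nat) : Int) PySem.Set.empty = g₀ := by
      rw [← he₀]
      exact PySem.Dict.getD_of_mem_items classes hcin hndc _
    have hgin : (labB lab g₀.headI.toNat, g₀) ∈ groups.items := by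
      rw [hig]
      exact List.mem_map.2 ⟨g₀, hg₀, rfl⟩
    have hlabeq : labB lab g₀.headI.toNat = labB lab v.toNat := (hkgv g₀ hg₀).1 he₀
    have hgetg : groups.getD (labB lab v.toNat) [] = g₀ := by
      rw [← hlabeq]
      exact PySem.Dict.getD_of_mem_items groups hgin hndg _
    have haddv : PySem.Set.add (classes.getD ((prt P v.toNat : Nat) : Int) PySem.Set.empty) v
        = g₀ ++ [v] := by
      rw [hgetc]
      exact PySem.Set.add_of_not_mem hvnotin
    refine ⟨gs.map (fun g => if prt P g.headI.toNat = prt P v.toNat then g ++ [v] else g),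
      hwf', by omega, ?_, ?_, ?_, ?_, ?_, ?_⟩
    · intro x y hx hy
      rw [hp'' x hx, hp'' y hy]
      exact hK x y hx hy
    · -- classes items
      show (classes.modify ((prt P v.toNat : Nat) : Int) PySem.Set.empty
        (fun s => PySem.Set.add s v)).items = _
      rw [PySem.Dict.modify, haddv,
        PySem.Dict.items_insert_of_contains _ _ (hcontc.2 ⟨g₀, hg₀, he₀⟩), hic,
        List.map_map, List.map_map]
      apply List.map_congr_left
      intro g hg
      simp only [Function.comp]
      by_cases hmatch : prt P g.headI.toNat = prt P v.toNat
      · have hgg : g = g₀ := huniq g hg hmatch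
        rw [if_pos (by simp [hmatch]), if_pos hmatch, hgg]
        have hhead : (g₀ ++ [v]).headI = g₀.headI :=
          headI_append_singleton (hmem g₀ hg₀).1 v
        rw [hhead, hp'' _ (hheadL g₀ hg₀), he₀]
      · rw [if_neg (by simp; intro hcst; exact absurd (by exact_mod_cast hcst) hmatch),
          if_neg hmatch, hp'' _ (hheadL g hg)]
    · -- groups items
      show (groups.modify (labB lab v.toNat) [] (fun l => l ++ [v])).items = _
      rw [PySem.Dict.modify, hgetg,
        PySem.Dict.items_insert_of_contains _ _ (hcontg.2 ⟨g₀, hg₀, hlabeq⟩), hig,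
        List.map_map, List.map_map]
      apply List.map_congr_left
      intro g hg
      simp only [Function.comp]
      by_cases hmatch : prt P g.headI.toNat = prt P v.toNat
      · have hgg : g = g₀ := huniq g hg hmatch
        rw [if_pos (by simp [hgg, hlabeq]), if_pos hmatch, hgg]
        have hhead : (g₀ ++ [v]).headI = g₀.headI :=
          headI_append_singleton (hmem g₀ hg₀).1 v
        rw [hhead, hlabeq]
      · rw [if_neg (by
            simp only [beq_iff_eq]
            intro he; exact hmatch ((hkgv g hg).2 he)),
          if_neg hmatch]
    · -- group properties
      intro g' hg'
      obtain ⟨g, hg, rfl⟩ := List.mem_map.1 hg'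
      by_cases hmatch : prt P g.headI.toNat = prt P v.toNat
      · rw [if_pos hmatch]
        obtain ⟨hne, hsort, hmm⟩ := hmem g hg
        have hbnd : ∀ m ∈ g, m < v := fun m hm => (hmm m hm).2.1
        have hhead : (g ++ [v]).headI = g.headI :=
          headI_append_singleton hne v
        refine ⟨by simp, ?_, ?_⟩
        · rw [List.pairwise_append]
          exact ⟨hsort, List.pairwise_singleton _ _, by
            intro m hm w hw
            rw [List.mem_singleton.1 hw]
            exact hbnd m hm⟩
        · intro m hm
          rw [hhead]
          rcases List.mem_append.1 hm with hm | hm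
          · obtain ⟨h1, h2, h3⟩ := hmm m hm
            exact ⟨h1, by omega, by rw [hp'' _ (by omega : m.toNat < L), hp'' _ (hheadL g hg)]; exact h3⟩
          · rw [List.mem_singleton.1 hm]
            refine ⟨hv1, by omega, ?_⟩
            rw [hp'' _ hc, hp'' _ (hheadL g hg), hmatch]
      · rw [if_neg hmatch]
        obtain ⟨hne, hsort, hmm⟩ := hmem g hg
        refine ⟨hne, hsort, ?_⟩
        intro m hm
        obtain ⟨h1, h2, h3⟩ := hmm m hm
        exact ⟨h1, by omega, by rw [hp'' _ (by omega : m.toNat < L), hp'' _ (hheadL g hg)]; exact h3⟩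
    · -- pairwise
      rw [List.pairwise_map]
      refine List.Pairwise.imp_of_mem ?_ hpw
      intro a b ha hb hr
      have hha : (if prt P a.headI.toNat = prt P v.toNat then a ++ [v] else a).headI = a.headI := by
        split
        · exact headI_append_singleton (hmem a ha).1 v
        · rfl
      have hhb : (if prt P b.headI.toNat = prt P v.toNat then b ++ [v] else b).headI = b.headI := by
        split
        · exact headI_append_singleton (hmem b hb).1 v
        · rfl
      rw [hha, hhb, hp'' _ (hheadL a ha), hp'' _ (hheadL b hb)]
      exact hr
    · -- completeness
      intro m h1 h2
      rcases eq_or_lt_of_le (show m ≤ v by omega) with he | hlt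
      · refine ⟨g₀ ++ [v], List.mem_map.2 ⟨g₀, hg₀, by rw [if_pos he₀]⟩, ?_⟩
        rw [he]
        exact List.mem_append.2 (Or.inr (List.mem_singleton.2 rfl))
      · obtain ⟨g, hg, hmg⟩ := hcomp m h1 hlt
        refine ⟨if prt P g.headI.toNat = prt P v.toNat then g ++ [v] else g,
          List.mem_map.2 ⟨g, hg, rfl⟩, ?_⟩
        split
        · exact List.mem_append.2 (Or.inl hmg)
        · exact hmg
  · -- v forms a new group
    have hnc : classes.contains ((prt P v.toNat : Nat) : Int) = false := by
      rcases Bool.eq_false_or_eq_true (classes.contains ((prt P v.toNat : Nat) : Int)) with h | h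
      · exact absurd (hcontc.1 h) hex
      · exact h
    have hng : groups.contains (labB lab v.toNat) = false := by
      rcases Bool.eq_false_or_eq_true (groups.contains (labB lab v.toNat)) with h | h
      · exact absurd (hexiff.2 (hcontg.1 h)) hex
      · exact h
    have haddv : PySem.Set.add (classes.getD ((prt P v.toNat : Nat) : Int) PySem.Set.empty) v
        = [v] := by
      rw [PySem.Dict.getD_of_not_contains classes PySem.Set.empty hnc]
      rfl
    have hgetg : groups.getD (labB lab v.toNat) [] = [] :=
      PySem.Dict.getD_of_not_contains groups [] hng
    refine ⟨gs ++ [[v]], hwf', by omega, ?_, ?_, ?_, ?_, ?_, ?_⟩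
    · intro x y hx hy
      rw [hp'' x hx, hp'' y hy]
      exact hK x y hx hy
    · show (classes.modify ((prt P v.toNat : Nat) : Int) PySem.Set.empty
        (fun s => PySem.Set.add s v)).items = _
      rw [PySem.Dict.modify, haddv, PySem.Dict.items_insert_of_not_contains _ _ hnc, hic,
        List.map_append]
      congr 1
      · apply List.map_congr_left
        intro g hg
        rw [hp'' _ (hheadL g hg)]
      · simp only [List.map_cons, List.map_nil]
        rw [show ([v] : List Int).headI = v from rfl, hp'' _ hc]
    · show (groups.modify (labB lab v.toNat) [] (fun l => l ++ [v])).items = _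
      rw [PySem.Dict.modify, hgetg, PySem.Dict.items_insert_of_not_contains _ _ hng, hig,
        List.map_append]
      simp
    · intro g hg
      rcases List.mem_append.1 hg with hg | hg
      · obtain ⟨hne, hsort, hmm⟩ := hmem g hg
        refine ⟨hne, hsort, ?_⟩
        intro m hm
        obtain ⟨h1, h2, h3⟩ := hmm m hm
        exact ⟨h1, by omega, by rw [hp'' _ (by omega : m.toNat < L), hp'' _ (hheadL g hg)]; exact h3⟩
      · rw [List.mem_singleton.1 hg]
        refine ⟨by simp, List.pairwise_singleton _ _, ?_⟩
        intro m hm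
        rw [List.mem_singleton.1 hm]
        exact ⟨hv1, by omega, rfl⟩
    · rw [List.pairwise_append]
      refine ⟨?_, List.pairwise_singleton _ _, ?_⟩
      · refine List.Pairwise.imp_of_mem ?_ hpw
        intro a b ha hb hr
        rw [hp'' _ (hheadL a ha), hp'' _ (hheadL b hb)]
        exact hr
      · intro g hg g' hg'
        rw [List.mem_singleton.1 hg']
        rw [show ([v] : List Int).headI = v from rfl]
        rw [hp'' _ (hheadL g hg), hp'' _ hc]
        intro he
        exact hex ⟨g, hg, he⟩
    · intro m h1 h2
      rcases eq_or_lt_of_le (show m ≤ v by omega) with he | hlt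
      · exact ⟨[v], List.mem_append.2 (Or.inr (List.mem_singleton.2 rfl)),
          by rw [he]; exact List.mem_singleton.2 rfl⟩
      · obtain ⟨g, hg, hmg⟩ := hcomp m h1 hlt
        exact ⟨g, List.mem_append.2 (Or.inl hg), hmg⟩


theorem phase2_all (n : Int) (L : Nat) (hL : L = (n+1).toNat) (Rf : List Int)
    (lab : List Int) (hlab : lab.length = L) (P0 : List Int)
    (hInv0 : Inv2 L Rf lab 1 P0 PySem.Dict.empty PySem.Dict.empty []) :
    ∀ (t : Nat), 1 + (t : Int) ≤ n + 1 →
    ∃ gs, Inv2 L Rf lab (1 + (t : Int))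
      ((PySem.List.pyRange 1 (1 + (t : Int)) 1).foldl
        (fun (st : List Int × PySem.Dict Int (PySem.Set Int)) i =>
          ((pvFind st.1 i).1, st.2.modify (pvFind st.1 i).2 PySem.Set.empty
            (fun s => PySem.Set.add s i))) (P0, PySem.Dict.empty)).1
      ((PySem.List.pyRange 1 (1 + (t : Int)) 1).foldl
        (fun (st : List Int × PySem.Dict Int (PySem.Set Int)) i =>
          ((pvFind st.1 i).1, st.2.modify (pvFind st.1 i).2 PySem.Set.empty
            (fun s => PySem.Set.add s i))) (P0, PySem.Dict.empty)).2
      ((PySem.List.pyRange 1 (1 + (t : Int)) 1).foldl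
        (fun (g : PySem.Dict Int (List Int)) v =>
          g.modify (PySem.List.pyGetD lab v 0) [] (fun l => l ++ [v])) PySem.Dict.empty) gs := by
  intro t
  induction t with
  | zero =>
    intro _
    refine ⟨[], ?_⟩
    rw [PySem.List.pyRange_one_eq_nil (by norm_num)]
    exact hInv0
  | succ t ih =>
    intro hbound
    have hb' : 1 + (t : Int) ≤ n + 1 := by push_cast at hbound ⊢; omega
    obtain ⟨gs, hInv⟩ := ih hb'
    have hsplit : PySem.List.pyRange 1 (1 + ((t+1 : Nat) : Int)) 1 =
        PySem.List.pyRange 1 (1 + (t : Int)) 1 ++ [1 + (t : Int)] := by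
      have : (1 + ((t+1 : Nat) : Int)) = (1 + (t : Int)) + 1 := by push_cast; ring
      rw [this, PySem.List.pyRange_one_succ_right (by omega)]
    rw [hsplit, List.foldl_append, List.foldl_append]
    simp only [List.foldl_cons, List.foldl_nil]
    obtain ⟨gs', hInv'⟩ := phase2_step n L Rf lab (1 + (t : Int)) _ _ _ gs hInv
      (by omega) (by push_cast at hbound; omega) hL hlab
    refine ⟨gs', ?_⟩
    have : (1 + ((t+1:Nat) : Int)) = (1 + (t : Int)) + 1 := by push_cast; ring
    rw [this]
    exact hInv'

theorem foldl_min_const (x : Int) (t : List Int) (h : ∀ y ∈ t, x ≤ y) :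
    t.foldl min x = x := by
  induction t generalizing x with
  | nil => rfl
  | cons y t' ih =>
    simp only [List.foldl_cons]
    rw [min_eq_left (h y List.mem_cons_self)]
    exact ih x (fun z hz => h z (List.mem_cons_of_mem y hz))

theorem min?_head (g : List Int) (hne : g ≠ []) (hsort : g.Pairwise (· < ·)) :
    PySem.List.min? g (fun x => x) = some g.headI := by
  cases g with
  | nil => exact absurd rfl hne
  | cons x t =>
    rw [PySem.List.min?_id_cons]
    have hx : ∀ y ∈ t, x ≤ y := by
      intro y hy
      exact le_of_lt ((List.pairwise_cons.1 hsort).1 y hy)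
    rw [foldl_min_const x t hx]
    rfl

theorem pyGetD_zero_headI {g : List Int} (hg : g ≠ []) :
    PySem.List.pyGetD g 0 0 = g.headI := by
  cases g with
  | nil => exact absurd rfl hg
  | cons x t => exact PySem.List.pyGetD_zero_cons x t 0

theorem phase3 (gs : List (List Int)) (hne : ∀ g ∈ gs, g ≠ [])
    (hsort : ∀ g ∈ gs, g.Pairwise (· < ·)) :
    gs.foldl (fun (r : PySem.Dict Int (List Int)) members =>
      match PySem.List.min? members (fun x => x) with
      | some rep => r.insert rep (PySem.List.sorted members (fun x => x) false)
      | none => r) PySem.Dict.empty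
    = gs.foldl (fun (r : PySem.Dict Int (List Int)) g =>
        r.insert (PySem.List.pyGetD g 0 0) g) PySem.Dict.empty := by
  apply PySem.List.foldl_congr_mem
  intro acc g hg
  rw [min?_head g (hne g hg) (hsort g hg)]
  have hpg : PySem.List.pyGetD g 0 0 = g.headI := pyGetD_zero_headI (hne g hg)
  have hsorted : PySem.List.sorted g (fun x => x) false = g :=
    PySem.List.sorted_eq_of_perm_of_pairwise_lt g g (fun x => x) (List.Perm.refl g)
      (hsort g hg)
  rw [hpg, hsorted]


set_option maxHeartbeats 4000000 in
theorem find_equiv_classes_spec : Claim_equal_find_equiv_classes := by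
  unfold Claim_equal_find_equiv_classes
  intro te n _hdom hpre
  unfold Spec_find_equiv_classes
  have hok : ∀ p ∈ te, (p.1 ≠ p.2 ∧ (p.2, p.1) ∈ te) →
      0 ≤ p.1 ∧ p.1.toNat < (n+1).toNat ∧ 0 ≤ p.2 ∧ p.2.toNat < (n+1).toNat := by
    intro p hp hg
    obtain ⟨hb1, hb2, hb3, hb4⟩ := hpre p hp hg
    refine ⟨hb1, by omega, hb3, by omega⟩
  simp only [find_equiv_classes, find_equiv_classes_alt]
  -- initial union-find state is well-formed with identity roots
  have hlen0 : (PySem.List.pyRange 0 (n+1) 1).length = (n+1).toNat := by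
    rw [PySem.List.length_pyRange_one]
    simp
  have hget0 : ∀ c : Nat, c < (n+1).toNat →
      (PySem.List.pyRange 0 (n+1) 1).getD c 0 = (c : Int) := by
    intro c hc
    rw [List.getD_eq_getElem?_getD, List.getElem?_eq_getElem (by omega : c < _)]
    rw [PySem.List.getElem_pyRange_one]
    simp
  have hwf0 : WFP (PySem.List.pyRange 0 (n+1) 1) (List.replicate (n+1).toNat (0 : Int)) := by
    refine ⟨by simp [hlen0], ?_⟩
    intro c hc
    rw [hlen0] at hc
    have he : pfn (PySem.List.pyRange 0 (n+1) 1) c = c := by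
      unfold pfn
      rw [hget0 c hc]
      omega
    rw [hlen0]
    refine ⟨by rw [hget0 c hc]; omega, by rw [he]; exact hc, fun hne => absurd he hne⟩
  have hK0 : ∀ x y : Nat, x < (n+1).toNat → y < (n+1).toNat →
      (prt (PySem.List.pyRange 0 (n+1) 1) x = prt (PySem.List.pyRange 0 (n+1) 1) y ↔
        labB (PySem.List.pyRange 0 (n+1) 1) x = labB (PySem.List.pyRange 0 (n+1) 1) y) := by
    intro x y hx hy
    have hfx : pfn (PySem.List.pyRange 0 (n+1) 1) x = x := by
      unfold pfn; rw [hget0 x hx]; omega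
    have hfy : pfn (PySem.List.pyRange 0 (n+1) 1) y = y := by
      unfold pfn; rw [hget0 y hy]; omega
    rw [prt_of_fix hfx, prt_of_fix hfy]
    unfold labB
    rw [hget0 x hx, hget0 y hy]
    constructor
    · intro h; exact_mod_cast h
    · intro h; exact_mod_cast h
  obtain ⟨hwfF, hlenF, hlabF, hKF⟩ := phase1_inv te (n+1).toNat hok te
    (fun p hp => hp) (PySem.List.pyRange 0 (n+1) 1) (List.replicate (n+1).toNat (0 : Int))
    (PySem.List.pyRange 0 (n+1) 1) hwf0 hlen0 hlen0 hK0
  rcases lt_or_ge n 0 with hn | hn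
  · -- n < 0 : the node range is empty, both results are []
    rw [PySem.List.pyRange_one_eq_nil (by omega : n + 1 ≤ 1)]
    simp only [List.foldl_nil]
    rfl
  · have hInv0 : Inv2 (n+1).toNat
        (te.foldl (fun (st : List Int × List Int) p =>
          if p.1 ≠ p.2 ∧ (p.2, p.1) ∈ te then pvUnion st.1 st.2 p.1 p.2 else st)
          (PySem.List.pyRange 0 (n+1) 1, List.replicate (n+1).toNat (0 : Int))).2
        (te.foldl (fun (lab : List Int) p =>
          if p.1 ≠ p.2 ∧ (p.2, p.1) ∈ PySem.Set.ofList te then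
            match PySem.List.pyGet? lab p.1, PySem.List.pyGet? lab p.2 with
            | some la, some lb =>
              if la = lb then lab else lab.map (fun v => if v = lb then la else v)
            | _, _ => lab
          else lab) (PySem.List.pyRange 0 (n+1) 1))
        1
        (te.foldl (fun (st : List Int × List Int) p =>
          if p.1 ≠ p.2 ∧ (p.2, p.1) ∈ te then pvUnion st.1 st.2 p.1 p.2 else st)
          (PySem.List.pyRange 0 (n+1) 1, List.replicate (n+1).toNat (0 : Int))).1
        PySem.Dict.empty PySem.Dict.empty [] := by
      refine ⟨hwfF, hlenF, hKF, rfl, rfl, ?_, List.Pairwise.nil, ?_⟩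
      · intro g hg
        simp at hg
      · intro m h1 h2
        omega
    obtain ⟨gs, hInv⟩ := phase2_all n (n+1).toNat rfl _ _ hlabF _ hInv0 n.toNat (by omega)
    rw [show 1 + ((n.toNat : Nat) : Int) = n + 1 by omega] at hInv
    obtain ⟨_, _, _, hicF, higF, hmemF, _, _⟩ := hInv
    have hvalc : (((PySem.List.pyRange 1 (n+1) 1).foldl
        (fun (st : List Int × PySem.Dict Int (PySem.Set Int)) i =>
          ((pvFind st.1 i).1, st.2.modify (pvFind st.1 i).2 PySem.Set.empty
            (fun s => PySem.Set.add s i)))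
        ((te.foldl (fun (st : List Int × List Int) p =>
          if p.1 ≠ p.2 ∧ (p.2, p.1) ∈ te then pvUnion st.1 st.2 p.1 p.2 else st)
          (PySem.List.pyRange 0 (n+1) 1, List.replicate (n+1).toNat (0 : Int))).1,
          PySem.Dict.empty)).2).values = gs := by
      rw [PySem.Dict.values, hicF, List.map_map]
      refine (List.map_congr_left ?_).trans (List.map_id _)
      intro g _
      rfl
    have hvalg : ((PySem.List.pyRange 1 (n+1) 1).foldl
        (fun (g : PySem.Dict Int (List Int)) v =>
          g.modify (PySem.List.pyGetD (te.foldl (fun (lab : List Int) p =>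
            if p.1 ≠ p.2 ∧ (p.2, p.1) ∈ PySem.Set.ofList te then
              match PySem.List.pyGet? lab p.1, PySem.List.pyGet? lab p.2 with
              | some la, some lb =>
                if la = lb then lab else lab.map (fun v => if v = lb then la else v)
              | _, _ => lab
            else lab) (PySem.List.pyRange 0 (n+1) 1)) v 0) [] (fun l => l ++ [v]))
        PySem.Dict.empty).values = gs := by
      rw [PySem.Dict.values, higF, List.map_map]
      refine (List.map_congr_left ?_).trans (List.map_id _)
      intro g _
      rfl
    rw [hvalc, hvalg,
      phase3 gs (fun g hg => (hmemF g hg).1) (fun g hg => (hmemF g hg).2.1)]
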